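-- pv_equiv track=rewrite | github.com/MLO-lab/leukemia-morphology-analysis | Segmentation/segment_cells_refactored.py | standardize_output_name
-- ===== SOURCE A (Python) =====
-- from typing import Dict, List, Tuple, Iterable, Optional
--
-- def standardize_output_name(image_file: str, role: str, tags: List[str]) -> str:
--     """
--     Replace the matched tag in image_file with the standardized role name (case-insensitive).
--     We choose the longest matching tag to avoid partial collisions.
--     """
--     best_tag = None
--     best_pos = -1
--     lower_name = image_file.lower()
--     for t in tags:
--         pos = lower_name.find(t.lower())
--         if pos >= 0:
--             if best_tag is None or len(t) > len(best_tag):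
--                 best_tag, best_pos = t, pos
--     if best_tag is None:
--         return image_file  # fallback: keep original name
--     # Replace the span [best_pos, best_pos+len(tag)) with the role (preserve the rest)
--     return image_file[:best_pos] + role + image_file[best_pos+len(best_tag):]
-- ===== SOURCE B (Python) =====
-- from typing import List
--
--
-- def standardize_output_name(image_file: str, role: str, tags: List[str]) -> str:
--     """Longest-tag-first scan: sort the tags by descending length (stable, so
--     equal-length ties keep original order) and splice at the first match."""
--     lower_name = image_file.lower()
--     for t in sorted(tags, key=len, reverse=True):
--         pos = lower_name.find(t.lower())
--         if pos >= 0: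
--             return image_file[:pos] + role + image_file[pos + len(t):]
--     return image_file
-- ===== Notes on version B (the rewrite author's own statement) =====
-- stated objective: simpler
-- what changed: Replaces A's accumulator loop tracking the best tag/position with a stable sort of the tags by descending length followed by an early return on the first matching tag.
import Mathlib
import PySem

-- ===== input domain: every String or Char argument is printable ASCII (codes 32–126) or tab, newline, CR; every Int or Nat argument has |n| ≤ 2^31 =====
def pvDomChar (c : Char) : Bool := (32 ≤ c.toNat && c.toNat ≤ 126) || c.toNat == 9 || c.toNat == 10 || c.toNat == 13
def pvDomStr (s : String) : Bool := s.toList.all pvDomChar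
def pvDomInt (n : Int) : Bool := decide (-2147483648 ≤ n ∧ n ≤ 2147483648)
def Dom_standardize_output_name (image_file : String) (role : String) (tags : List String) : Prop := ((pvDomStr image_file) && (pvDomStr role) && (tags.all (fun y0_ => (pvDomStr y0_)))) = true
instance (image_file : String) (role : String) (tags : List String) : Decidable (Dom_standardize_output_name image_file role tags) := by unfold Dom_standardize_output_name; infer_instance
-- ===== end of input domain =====

-- B replaces A's best-tag accumulator loop by a stable descending-length sort plus first-match early return; same return value, proved equal.


-- ===== PORT A =====
def standardize_output_name (image_file : String) (role : String) (tags : List String) : String :=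
  let lower_name := PySem.Str.lower image_file
  let st := tags.foldl (fun (st : Option String × Int) t =>
      let pos := PySem.Str.find lower_name (PySem.Str.lower t)
      if 0 ≤ pos then
        match st.1 with
        | none => (some t, pos)
        | some b => if PySem.Str.len t > PySem.Str.len b then (some t, pos) else st
      else st) (none, -1)
  match st with
  | (none, _) => image_file
  | (some best_tag, best_pos) =>
      PySem.Str.slice image_file none (some best_pos) ++ role ++
        PySem.Str.slice image_file (some (best_pos + PySem.Str.len best_tag)) none

-- ===== PORT B =====
def standardize_output_name_alt (image_file : String) (role : String) (tags : List String) : String :=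
  let lower_name := PySem.Str.lower image_file
  match (PySem.List.sorted tags (fun t => PySem.Str.len t) true).find?
      (fun t => decide (0 ≤ PySem.Str.find lower_name (PySem.Str.lower t))) with
  | some t =>
      let pos := PySem.Str.find lower_name (PySem.Str.lower t)
      PySem.Str.slice image_file none (some pos) ++ role ++
        PySem.Str.slice image_file (some (pos + PySem.Str.len t)) none
  | none => image_file

-- ===== PRECONDITION & SPEC =====
def Spec_standardize_output_name (image_file : String) (role : String) (tags : List String) (out : String) : Prop := out = standardize_output_name_alt image_file role tags
instance (image_file : String) (role : String) (tags : List String) (out : String) : Decidable (Spec_standardize_output_name image_file role tags out) := by unfold Spec_standardize_output_name; infer_instance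

-- ===== CLAIM (what is proved, stated in full; the proofs are below) =====
def Claim_equal_standardize_output_name : Prop := ∀ (image_file : String) (role : String) (tags : List String), Dom_standardize_output_name image_file role tags → Spec_standardize_output_name image_file role tags (standardize_output_name image_file role tags)

-- ===== LEMMAS AND PROOFS =====

-- A's accumulator step, on the chosen-tag option only
def pvStep (ln : String) (best : Option String) (t : String) : Option String :=
  if decide (0 ≤ PySem.Str.find ln (PySem.Str.lower t)) = true then
    match best with
    | none => some t
    | some b => if PySem.Str.len t > PySem.Str.len b then some t else some b
  else best

-- A's full loop state as a function of the chosen-tag option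
def pvRepr (ln : String) : Option String → Option String × Int
  | none => (none, -1)
  | some b => (some b, PySem.Str.find ln (PySem.Str.lower b))

theorem pv_insertBy_split {α : Type} (before : α → α → Bool) (x : α) (ys : List α) :
    PySem.List.insertBy before x ys
      = ys.takeWhile (fun y => !before x y) ++ x :: ys.dropWhile (fun y => !before x y) := by
  induction ys with
  | nil => simp [PySem.List.insertBy]
  | cons y ys ih =>
    by_cases h : before x y = true
    · simp [PySem.List.insertBy, h]
    · simp only [Bool.not_eq_true] at h
      simp [PySem.List.insertBy, h, ih]

theorem pv_dropWhile_lt {α : Type} (key : α → Int) (t : α) (ys : List α)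
    (hs : ys.Pairwise (fun a b => key b ≤ key a)) :
    ∀ y ∈ ys.dropWhile (fun y => !(decide (key y < key t))), key y < key t := by
  induction ys with
  | nil => simp
  | cons a ys ih =>
    rcases List.pairwise_cons.mp hs with ⟨ha, hys⟩
    by_cases h : key a < key t
    · simp only [List.dropWhile_cons, h, decide_true, Bool.not_true]
      intro y hy
      rcases List.mem_cons.mp hy with rfl | hy
      · exact h
      · exact lt_of_le_of_lt (ha y hy) h
    · simp only [List.dropWhile_cons, h, decide_false, Bool.not_false]
      exact ih hys

theorem pv_pairwise_insert {α : Type} (key : α → Int) (t : α) (ys : List α)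
    (hs : ys.Pairwise (fun a b => key b ≤ key a)) :
    (PySem.List.insertBy (fun a b => decide (key b < key a)) t ys).Pairwise
      (fun a b => key b ≤ key a) := by
  rw [pv_insertBy_split]
  have hpre : (ys.takeWhile (fun y => !(decide (key y < key t)))).Pairwise (fun a b => key b ≤ key a) :=
    hs.sublist (List.takeWhile_sublist _)
  have hsuf : (ys.dropWhile (fun y => !(decide (key y < key t)))).Pairwise (fun a b => key b ≤ key a) :=
    hs.sublist (List.dropWhile_sublist _)
  have hdrop := pv_dropWhile_lt key t ys hs
  apply List.pairwise_append.mpr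
  refine ⟨hpre, ?_, ?_⟩
  · exact List.pairwise_cons.mpr ⟨fun y hy => le_of_lt (hdrop y hy), hsuf⟩
  · intro a ha b hb
    have hta : key t ≤ key a := by
      have := List.mem_takeWhile_imp ha
      simp only [Bool.not_eq_true', decide_eq_false_iff_not, not_lt] at this
      exact this
    rcases List.mem_cons.mp hb with rfl | hb
    · exact hta
    · exact le_trans (le_of_lt (hdrop b hb)) hta

theorem pv_find?_insert {α : Type} (p : α → Bool) (key : α → Int) (t : α) (ys : List α)
    (hs : ys.Pairwise (fun a b => key b ≤ key a)) :
    (PySem.List.insertBy (fun a b => decide (key b < key a)) t ys).find? p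
      = (if p t then
          match ys.find? p with
          | none => some t
          | some b => if key t > key b then some t else some b
        else ys.find? p) := by
  have hdrop := pv_dropWhile_lt key t ys hs
  set pre := ys.takeWhile (fun y => !(decide (key y < key t))) with hpredef
  set suf := ys.dropWhile (fun y => !(decide (key y < key t))) with hsufdef
  have hsplit : pre ++ suf = ys := List.takeWhile_append_dropWhile
  have hysfind : ys.find? p = (pre.find? p).or (suf.find? p) := by
    rw [← hsplit, List.find?_append]
  rw [pv_insertBy_split, ← hpredef, ← hsufdef, List.find?_append, hysfind]
  cases hpt : p t with
  | false =>
    rw [List.find?_cons_of_neg (by simp [hpt])]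
    simp
  | true =>
    rw [List.find?_cons_of_pos hpt]
    cases hfp : pre.find? p with
    | some b =>
      have htb : key t ≤ key b := by
        have hb := List.mem_of_find?_eq_some hfp
        rw [hpredef] at hb
        have := List.mem_takeWhile_imp hb
        simp only [Bool.not_eq_true', decide_eq_false_iff_not, not_lt] at this
        exact this
      simp [not_lt.mpr htb]
    | none =>
      cases hfs : suf.find? p with
      | none => simp
      | some b =>
        have hb := List.mem_of_find?_eq_some hfs
        have hbt : key b < key t := hdrop b hb
        simp [hbt]

theorem pv_foldl_insert_find {α : Type} (p : α → Bool) (key : α → Int) (ts : List α) :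
    ∀ acc : List α, acc.Pairwise (fun a b => key b ≤ key a) →
      ((ts.foldl (fun acc x => PySem.List.insertBy (fun a b => decide (key b < key a)) x acc) acc).find? p)
        = ts.foldl (fun best t =>
            if p t then
              match best with
              | none => some t
              | some b => if key t > key b then some t else some b
            else best) (acc.find? p) := by
  induction ts with
  | nil => intro acc _; rfl
  | cons t ts ih =>
    intro acc hacc
    simp only [List.foldl_cons]
    rw [ih _ (pv_pairwise_insert key t acc hacc), pv_find?_insert p key t acc hacc]

theorem pv_chosen_eq (ln : String) (tags : List String) :
    (PySem.List.sorted tags (fun t => PySem.Str.len t) true).find?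
        (fun t => decide (0 ≤ PySem.Str.find ln (PySem.Str.lower t)))
      = tags.foldl (pvStep ln) none := by
  rw [PySem.List.sorted_rev_eq_foldl_insertBy]
  have h := pv_foldl_insert_find
      (p := fun t => decide (0 ≤ PySem.Str.find ln (PySem.Str.lower t)))
      (key := fun t => PySem.Str.len t) tags [] List.Pairwise.nil
  simp only [List.find?_nil] at h
  rw [h]
  apply PySem.List.foldl_congr_mem
  intro acc x _
  cases acc <;> rfl

theorem pv_foldA_pair (ln : String) (ts : List String) :
    ∀ best : Option String,
      ts.foldl (fun (st : Option String × Int) t =>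
          if 0 ≤ PySem.Str.find ln (PySem.Str.lower t) then
            match st.1 with
            | none => (some t, PySem.Str.find ln (PySem.Str.lower t))
            | some b =>
                if PySem.Str.len t > PySem.Str.len b then (some t, PySem.Str.find ln (PySem.Str.lower t))
                else st
          else st) (pvRepr ln best)
        = pvRepr ln (ts.foldl (pvStep ln) best) := by
  induction ts with
  | nil => intro best; rfl
  | cons t ts ih =>
    intro best
    simp only [List.foldl_cons]
    have hstep : (if 0 ≤ PySem.Str.find ln (PySem.Str.lower t) then
            match (pvRepr ln best).1 with
            | none => (some t, PySem.Str.find ln (PySem.Str.lower t))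
            | some b =>
                if PySem.Str.len t > PySem.Str.len b then (some t, PySem.Str.find ln (PySem.Str.lower t))
                else pvRepr ln best
          else pvRepr ln best) = pvRepr ln (pvStep ln best t) := by
      cases best with
      | none =>
        by_cases h : 0 ≤ PySem.Str.find ln (PySem.Str.lower t)
        · simp only [pvRepr, pvStep, decide_eq_true_eq, if_pos h]
        · simp only [pvRepr, pvStep, decide_eq_true_eq, if_neg h]
      | some b =>
        by_cases h : 0 ≤ PySem.Str.find ln (PySem.Str.lower t)
        · by_cases h2 : PySem.Str.len t > PySem.Str.len b
          · simp only [pvRepr, pvStep, decide_eq_true_eq, if_pos h, if_pos h2]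
          · simp only [pvRepr, pvStep, decide_eq_true_eq, if_pos h, if_neg h2]
        · simp only [pvRepr, pvStep, decide_eq_true_eq, if_neg h]
    rw [hstep, ih]

theorem pv_ports_agree (image_file role : String) (tags : List String) :
    standardize_output_name image_file role tags = standardize_output_name_alt image_file role tags := by
  simp only [standardize_output_name, standardize_output_name_alt]
  rw [pv_chosen_eq]
  have h := pv_foldA_pair (PySem.Str.lower image_file) tags none
  simp only [pvRepr] at h
  rw [h]
  cases tags.foldl (pvStep (PySem.Str.lower image_file)) none with
  | none => rfl
  | some b => rfl

-- ===== VERDICT (by name: the statement is the Claim_ definition above) =====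
theorem standardize_output_name_spec : Claim_equal_standardize_output_name := by
  intro image_file role tags _
  unfold Spec_standardize_output_name
  exact pv_ports_agree image_file role tags
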